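-- pv_equiv track=rewrite | github.com/MrBrantCode/unitest_baseline | mut_generate/mist_train_cf/cf_65234/solution.py | solve
-- ===== SOURCE A (Python) =====
-- def solve(arr, target):
--     # Eliminating redundancy by using Set data structure in Python
--     unique_arr = list(set(arr))
--
--     # Sorting the array in non-descending order
--     unique_arr.sort()
--
--     # Implementing Binary Search
--     left, right = 0, len(unique_arr)-1
--     while left <= right:
--         mid = (left + right) // 2
--         if unique_arr[mid] == target:
--             return mid  # Return the index of the target
--         elif unique_arr[mid] < target:
--             left = mid + 1
--         else:
--             right = mid - 1
--
--     # If the element is not found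
--     return -1
-- ===== SOURCE B (Python) =====
-- def solve(arr, target):
--     sorted_unique = sorted(set(arr))
--     try:
--         return sorted_unique.index(target)
--     except ValueError:
--         return -1
-- ===== Notes on version B (the rewrite author's own statement) =====
-- stated objective: simpler
-- what changed: The hand-written binary-search loop (left/right/mid halving) is replaced by a single left-to-right linear lookup via list.index on the same sorted deduplicated list; correct because a strictly sorted list contains the target at a unique position, so the first match is the binary-search hit.
import Mathlib
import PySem

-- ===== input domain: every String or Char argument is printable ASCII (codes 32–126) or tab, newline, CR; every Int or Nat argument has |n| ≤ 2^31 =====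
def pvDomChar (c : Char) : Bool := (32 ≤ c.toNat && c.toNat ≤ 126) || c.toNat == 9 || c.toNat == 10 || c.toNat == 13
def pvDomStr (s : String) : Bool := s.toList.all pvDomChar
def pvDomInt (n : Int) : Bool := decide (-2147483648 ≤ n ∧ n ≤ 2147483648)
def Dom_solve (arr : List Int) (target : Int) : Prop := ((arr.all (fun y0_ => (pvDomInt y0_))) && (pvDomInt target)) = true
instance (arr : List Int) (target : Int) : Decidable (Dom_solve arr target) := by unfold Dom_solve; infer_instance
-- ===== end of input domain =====

-- B replaces A's hand-written binary-search loop over sorted(set(arr)) by a single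
-- linear list.index lookup on the same sorted deduplicated list (simpler).


-- ===== PORT A =====
-- the while loop of A as structural recursion on a fuel bound: each iteration shrinks
-- right+1-left, so fuel = len(u)+1 (supplied by `solve` below) is never exhausted;
-- unique_arr[mid] is always in range when read (0 ≤ left ≤ mid ≤ right < len),
-- so pyGetD's default is never used
def solveLoop (u : List Int) (target : Int) : Nat → Int → Int → Int
  | 0, _, _ => -1
  | Nat.succ n, left, right =>
    if left ≤ right then
      let mid := PySem.Int.floordiv (left + right) 2
      let v := PySem.List.pyGetD u mid 0
      if v = target then mid
      else if v < target then solveLoop u target n (mid + 1) right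
      else solveLoop u target n left (mid - 1)
    else -1

def solve (arr : List Int) (target : Int) : Int :=
  let unique_arr := PySem.List.sorted (PySem.Set.ofList arr) (fun x => x) false
  solveLoop unique_arr target (unique_arr.length + 1) 0 ((unique_arr.length : Int) - 1)

-- ===== PORT B =====
def solve_alt (arr : List Int) (target : Int) : Int :=
  let sorted_unique := PySem.List.sorted (PySem.Set.ofList arr) (fun x => x) false
  match PySem.List.index? sorted_unique target with
  | some i => (i : Int)
  | none => -1

-- ===== PRECONDITION & SPEC =====
def Spec_solve (arr : List Int) (target : Int) (out : Int) : Prop := out = solve_alt arr target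
instance (arr : List Int) (target : Int) (out : Int) : Decidable (Spec_solve arr target out) := by unfold Spec_solve; infer_instance

-- ===== CLAIM (what is proved, stated in full; the proofs are below) =====
def Claim_equal_solve : Prop := ∀ (arr : List Int) (target : Int), Dom_solve arr target → Spec_solve arr target (solve arr target)

-- ===== LEMMAS AND PROOFS =====

-- on a strictly sorted list, the index of the target is unique, hence index? finds it
lemma index?_of_sorted_getElem (u : List Int) (t : Int) (hs : u.Pairwise (· < ·))
    (k : Nat) (hk : k < u.length) (hkt : u[k] = t) :
    PySem.List.index? u t = some k := by
  rw [PySem.List.index?_eq_some_iff]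
  refine ⟨u.take k, u.drop (k + 1), ?_, ?_, ?_⟩
  · rw [← hkt, ← List.drop_eq_getElem_cons hk, List.take_append_drop]
  · simp [List.length_take]; omega
  · intro hmem
    obtain ⟨j, hj, hjt⟩ := List.getElem_of_mem hmem
    have hjk : j < k := by
      have := hj; rw [List.length_take] at this; omega
    have : u[j] < u[k] := List.pairwise_iff_getElem.1 hs j k (by omega) hk hjk
    rw [List.getElem_take] at hjt
    omega

lemma loop_eq (u : List Int) (t : Int) (hs : u.Pairwise (· < ·)) :
    ∀ (n : Nat) (l r : Int), (r + 1 - l).toNat ≤ n → 0 ≤ l → r < (u.length : Int) →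
    (∀ (i : Nat) (hi : i < u.length), u[i] = t → l ≤ (i : Int) ∧ (i : Int) ≤ r) →
    solveLoop u t n l r =
      (match PySem.List.index? u t with | some i => (i : Int) | none => -1) := by
  intro n
  induction n with
  | zero =>
    intro l r hn hl hr hinv
    have hnone : PySem.List.index? u t = none := by
      rw [PySem.List.index?_eq_none_iff]
      intro hmem
      obtain ⟨i, hi, hit⟩ := List.getElem_of_mem hmem
      have := hinv i hi hit; omega
    rw [solveLoop, hnone]
  | succ n ih =>
    intro l r hn hl hr hinv
    by_cases hlr : l ≤ r
    · have hmid := PySem.Int.floordiv_two_mid_bounds hlr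
      set mid := PySem.Int.floordiv (l + r) 2 with hmiddef
      have hmid0 : 0 ≤ mid := by omega
      have hmidlt : mid < (u.length : Int) := by omega
      have hmidnat : mid.toNat < u.length := by omega
      have hv : PySem.List.pyGetD u mid 0 = u[mid.toNat] := by
        simp [PySem.List.pyGetD, PySem.List.pyGet?, PySem.List.pyIdx?, hmid0, hmidlt]
      have hstep : solveLoop u t (n + 1) l r =
          (if u[mid.toNat] = t then mid
           else if u[mid.toNat] < t then solveLoop u t n (mid + 1) r
           else solveLoop u t n l (mid - 1)) := by
        rw [solveLoop, if_pos hlr, ← hv]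
      rw [hstep]
      by_cases heq : u[mid.toNat] = t
      · rw [if_pos heq, index?_of_sorted_getElem u t hs mid.toNat hmidnat heq]
        simp; omega
      · rw [if_neg heq]
        by_cases hlt : u[mid.toNat] < t
        · rw [if_pos hlt]
          refine ih (mid + 1) r (by omega) (by omega) hr ?_
          intro i hi hit
          have hold := hinv i hi hit
          rcases lt_trichotomy (i : Int) mid with h | h | h
          · have : u[i] < u[mid.toNat] :=
              List.pairwise_iff_getElem.1 hs i mid.toNat hi hmidnat (by omega)
            omega
          · exfalso; apply heq
            have hcg : u[mid.toNat] = u[i] := by congr 1; omega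
            rw [hcg]; exact hit
          · omega
        · rw [if_neg hlt]
          refine ih l (mid - 1) (by omega) hl (by omega) ?_
          intro i hi hit
          have hold := hinv i hi hit
          rcases lt_trichotomy (i : Int) mid with h | h | h
          · omega
          · exfalso; apply heq
            have hcg : u[mid.toNat] = u[i] := by congr 1; omega
            rw [hcg]; exact hit
          · have : u[mid.toNat] < u[i] :=
              List.pairwise_iff_getElem.1 hs mid.toNat i hmidnat hi (by omega)
            omega
    · have hnone : PySem.List.index? u t = none := by
        rw [PySem.List.index?_eq_none_iff]
        intro hmem
        obtain ⟨i, hi, hit⟩ := List.getElem_of_mem hmem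
        have := hinv i hi hit; omega
      rw [solveLoop, if_neg hlr, hnone]

-- ===== VERDICT (by name: the statement is the Claim_ definition above) =====
theorem solve_spec : Claim_equal_solve := by
  intro arr target _
  unfold Spec_solve solve solve_alt
  set u := PySem.List.sorted (PySem.Set.ofList arr) (fun x => x) false with hu
  exact loop_eq u target (hu ▸ PySem.List.sorted_ofList_pairwise_lt arr)
    (u.length + 1) 0 ((u.length : Int) - 1) (by omega) (by omega) (by omega)
    (fun i hi _ => by omega)
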